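-- pv_equiv track=rewrite | github.com/ptreezh/sscisubagent-skills | skills/network-computation-expert/modules/community_detection.py | find_most_connected_communities
-- ===== SOURCE A (Python) =====
-- from typing import Dict, List, Any
--
-- def find_most_connected_communities(inter_community_edges: Dict[tuple, int]) -> List[tuple]:
--     """
--     找出连接最多的社区对
--
--     Args:
--         inter_community_edges: 社区间边的字典
--
--     Returns:
--         连接最多的社区对列表
--     """
--     if not inter_community_edges:
--         return []
--
--     max_connections = max(inter_community_edges.values())
--     most_connected = [
--         (pair, count) for pair, count in inter_community_edges.items()
--         if count == max_connections
--     ]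
--
--     return most_connected
-- ===== SOURCE B (Python) =====
-- from typing import Dict, List, Any
--
-- def find_most_connected_communities(inter_community_edges: Dict[tuple, int]) -> List[tuple]:
--     """Single pass: keep the running maximum and reset/extend the result list."""
--     max_connections = None
--     most_connected = []
--     for pair, count in inter_community_edges.items():
--         if max_connections is None or count > max_connections:
--             max_connections = count
--             most_connected = [(pair, count)]
--         elif count == max_connections:
--             most_connected.append((pair, count))
--     return most_connected
-- ===== Notes on version B (the rewrite author's own statement) =====
-- stated objective: alternative
-- what changed: A computes max(values) in one pass and then filters the items in a second pass; B makes a single pass over the items, keeping a running maximum and resetting the result list on a strict increase and appending on a tie.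
import Mathlib
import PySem

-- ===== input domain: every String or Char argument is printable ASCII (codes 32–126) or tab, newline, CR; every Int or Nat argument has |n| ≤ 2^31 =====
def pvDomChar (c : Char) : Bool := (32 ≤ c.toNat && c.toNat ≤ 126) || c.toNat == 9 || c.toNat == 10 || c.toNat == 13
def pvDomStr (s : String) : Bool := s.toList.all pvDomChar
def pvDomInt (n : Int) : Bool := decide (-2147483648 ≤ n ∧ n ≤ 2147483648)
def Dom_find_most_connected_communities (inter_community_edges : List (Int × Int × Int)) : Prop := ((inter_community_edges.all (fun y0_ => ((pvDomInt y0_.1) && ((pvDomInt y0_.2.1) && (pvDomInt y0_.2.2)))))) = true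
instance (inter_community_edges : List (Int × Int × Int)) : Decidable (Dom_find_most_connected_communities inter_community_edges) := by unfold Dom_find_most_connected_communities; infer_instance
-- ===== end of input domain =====

-- B replaces A's max-then-filter two-pass comprehension by a single fold that keeps the
-- running maximum and resets/extends the result list (objective: alternative decomposition).

-- ===== PORT A =====
-- shared decoding of the parameter: the Python dict (key = community pair, value = count)
-- arrives as a list of triples; Python dict construction keeps first key position, last value
def pvAsDict (inter_community_edges : List (Int × Int × Int)) : PySem.Dict (Int × Int) Int :=
  PySem.Dict.ofList (inter_community_edges.map (fun t => ((t.1, t.2.1), t.2.2)))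

def find_most_connected_communities (inter_community_edges : List (Int × Int × Int)) : List ((Int × Int) × Int) :=
  let d := pvAsDict inter_community_edges
  if d.items.isEmpty then []
  else
    match PySem.List.max? d.values (fun v => v) with
    | none => []
    | some max_connections => d.items.filter (fun pc => pc.2 == max_connections)

-- ===== PORT B =====
def pvStep (s : Option Int × List ((Int × Int) × Int)) (pc : (Int × Int) × Int) :
    Option Int × List ((Int × Int) × Int) :=
  match s.1 with
  | none => (some pc.2, [pc])
  | some m =>
    if pc.2 > m then (some pc.2, [pc])
    else if pc.2 == m then (s.1, s.2 ++ [pc])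
    else s

def find_most_connected_communities_alt (inter_community_edges : List (Int × Int × Int)) : List ((Int × Int) × Int) :=
  ((pvAsDict inter_community_edges).items.foldl pvStep (none, [])).2

-- ===== PRECONDITION & SPEC =====
def Spec_find_most_connected_communities (inter_community_edges : List (Int × Int × Int)) (out : List ((Int × Int) × Int)) : Prop := out = find_most_connected_communities_alt inter_community_edges
instance (inter_community_edges : List (Int × Int × Int)) (out : List ((Int × Int) × Int)) : Decidable (Spec_find_most_connected_communities inter_community_edges out) := by unfold Spec_find_most_connected_communities; infer_instance

-- ===== CLAIM (what is proved, stated in full; the proofs are below) =====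
def Claim_equal_find_most_connected_communities : Prop := ∀ (inter_community_edges : List (Int × Int × Int)), Dom_find_most_connected_communities inter_community_edges → Spec_find_most_connected_communities inter_community_edges (find_most_connected_communities inter_community_edges)

-- ===== LEMMAS AND PROOFS =====

-- invariant of B's fold from a live state (some m, acc): the final maximum is the running
-- max of m and the remaining values, and the final list is acc (kept only if the maximum
-- never strictly increases) followed by the remaining items attaining the final maximum
theorem pvStep_foldl_inv (xs : List ((Int × Int) × Int)) :
    ∀ (m : Int) (acc : List ((Int × Int) × Int)),
      xs.foldl pvStep (some m, acc)
        = (some ((xs.map (·.2)).foldl max m),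
           (if m = (xs.map (·.2)).foldl max m then acc else [])
             ++ xs.filter (fun pc => pc.2 == (xs.map (·.2)).foldl max m)) := by
  induction xs with
  | nil => intro m acc; simp
  | cons p t ih =>
    intro m acc
    have hM : ∀ a : Int, a ≤ (t.map (·.2)).foldl max a :=
      fun a => (PySem.List.le_foldl_max (t.map (·.2)) a).1
    simp only [List.foldl_cons, List.map_cons, List.filter_cons]
    by_cases h1 : p.2 > m
    · have hstep : pvStep (some m, acc) p = (some p.2, [p]) := by
        simp [pvStep, h1]
      rw [hstep, ih p.2 [p]]
      have hmax : max m p.2 = p.2 := by omega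
      simp only [hmax]
      have hMge : p.2 ≤ (t.map (·.2)).foldl max p.2 := hM p.2
      have hmne : m ≠ (t.map (·.2)).foldl max p.2 := by omega
      rw [if_neg hmne]
      by_cases h2 : p.2 = (t.map (·.2)).foldl max p.2
      · rw [if_pos h2]
        simp only [beq_iff_eq]
        rw [if_pos h2]
        simp
      · rw [if_neg h2]
        simp only [beq_iff_eq]
        rw [if_neg h2]
    · by_cases h2 : p.2 = m
      · have hstep : pvStep (some m, acc) p = (some m, acc ++ [p]) := by
          simp [pvStep, h2]
        rw [hstep, ih m (acc ++ [p])]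
        have hmax : max m p.2 = m := by omega
        simp only [hmax]
        by_cases h3 : m = (t.map (·.2)).foldl max m
        · rw [if_pos h3, if_pos h3]
          have : p.2 = (t.map (·.2)).foldl max m := by omega
          simp [this]
        · rw [if_neg h3, if_neg h3]
          have : ¬ p.2 = (t.map (·.2)).foldl max m := by omega
          simp [this]
      · have hlt : p.2 < m := by omega
        have hstep : pvStep (some m, acc) p = (some m, acc) := by
          simp [pvStep, h1, h2]
        rw [hstep, ih m acc]
        have hmax : max m p.2 = m := by omega
        simp only [hmax]
        have hMge : m ≤ (t.map (·.2)).foldl max m := hM m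
        have : ¬ p.2 = (t.map (·.2)).foldl max m := by omega
        simp [this]

-- on any items list the two computations agree
theorem pv_items_eq (xs : List ((Int × Int) × Int)) :
    (if xs.isEmpty then []
     else match PySem.List.max? (xs.map (·.2)) (fun v => v) with
          | none => []
          | some m => xs.filter (fun pc => pc.2 == m))
      = (xs.foldl pvStep (none, [])).2 := by
  cases xs with
  | nil => simp
  | cons p t =>
    simp only [List.isEmpty_cons]
    rw [if_neg (by decide)]
    rw [List.map_cons, PySem.List.max?_id_cons]
    simp only [List.foldl_cons]
    have hstep : pvStep ((none : Option Int), ([] : List ((Int × Int) × Int))) p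
        = (some p.2, [p]) := by simp [pvStep]
    rw [hstep, pvStep_foldl_inv t p.2 [p]]
    simp only [List.filter_cons]
    by_cases h2 : p.2 = (t.map (·.2)).foldl max p.2
    · rw [if_pos h2]
      simp only [beq_iff_eq]
      rw [if_pos h2]
      simp
    · rw [if_neg h2]
      simp only [beq_iff_eq]
      rw [if_neg h2]
      simp

-- ===== VERDICT (by name: the statement is the Claim_ definition above) =====
theorem find_most_connected_communities_spec : Claim_equal_find_most_connected_communities := by
  intro edges _
  show find_most_connected_communities edges = find_most_connected_communities_alt edges
  unfold find_most_connected_communities find_most_connected_communities_alt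
  have := pv_items_eq (pvAsDict edges).items
  simpa [PySem.Dict.values] using this
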